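-- pv_equiv track=rewrite | github.com/Nischal5123/Querying-With-Conflicts | src/compas_md_fast_scalability.py | _reachability_bitsets
-- ===== SOURCE A (Python) =====
-- def _reachability_bitsets(items, edges):
--     n = len(items);
--     idx = {v: i for i, v in enumerate(items)}
--     adj = [[] for _ in range(n)]
--     for u, v in edges:
--         iu, iv = idx.get(u), idx.get(v)
--         if iu is not None and iv is not None and iu < iv: adj[iu].append(iv)
--     R = [0] * n
--     for i in range(n - 1, -1, -1):
--         m = 0
--         for j in adj[i]: m |= (1 << j) | R[j]
--         R[i] = m
--     return idx, R
-- ===== SOURCE B (Python) =====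
-- def _reachability_bitsets(items, edges):
--     # Sort-then-flat-scan: no per-node adjacency lists. The filtered edges are
--     # collected as index pairs, sorted by source descending, and one flat pass
--     # folds each edge into R; by the time an edge (iu, iv) is seen, every edge
--     # sourced at iv (> iu) was already folded, so R[iv] is final.
--     idx = {v: i for i, v in enumerate(items)}
--     pairs = []
--     for u, v in edges:
--         iu, iv = idx.get(u), idx.get(v)
--         if iu is not None and iv is not None and iu < iv:
--             pairs.append((iu, iv))
--     pairs.sort(key=lambda p: -p[0])
--     R = [0] * len(items)
--     for iu, iv in pairs:
--         R[iu] |= (1 << iv) | R[iv]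
--     return idx, R
-- ===== Notes on version B (the rewrite author's own statement) =====
-- stated objective: alternative
-- what changed: Drops the per-node adjacency lists and the nested reverse-index sweep: B collects the filtered edges as flat index pairs, sorts them by source descending, and computes R in one flat fold over the sorted edge list (R[iu] |= (1<<iv)|R[iv]), correct because every edge sourced at iv>iu is folded first.
import Mathlib
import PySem

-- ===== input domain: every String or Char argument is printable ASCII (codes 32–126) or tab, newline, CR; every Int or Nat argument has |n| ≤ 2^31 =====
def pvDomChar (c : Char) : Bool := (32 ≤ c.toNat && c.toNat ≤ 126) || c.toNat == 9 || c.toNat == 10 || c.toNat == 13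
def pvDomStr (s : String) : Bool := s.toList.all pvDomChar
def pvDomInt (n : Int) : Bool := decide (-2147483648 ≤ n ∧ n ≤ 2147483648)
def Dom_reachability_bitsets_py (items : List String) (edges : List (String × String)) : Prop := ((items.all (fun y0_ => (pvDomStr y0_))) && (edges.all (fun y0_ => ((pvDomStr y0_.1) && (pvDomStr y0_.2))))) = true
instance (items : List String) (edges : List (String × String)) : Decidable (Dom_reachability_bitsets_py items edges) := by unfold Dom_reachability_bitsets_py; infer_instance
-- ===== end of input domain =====

-- B drops A's per-node adjacency lists and nested reverse-index sweep: it collects the filtered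
-- edges as flat index pairs, sorts them by source descending, and folds them in one flat pass
-- (R[iu] |= (1<<iv)|R[iv]); same return value, no observable mutation in either program.

-- ===== PORT A =====
-- idx = {v: i for i, v in enumerate(items)}  (identical line in A and B, shared helper)
def pvIdx (items : List String) : PySem.Dict String Int :=
  (PySem.List.enumerate items 0).foldl (fun d p => d.insert p.2 p.1) PySem.Dict.empty

-- A's edge loop: for u, v in edges: if iu/iv present and iu < iv: adj[iu].append(iv)
-- (idx values are ≥ 0, so `adj[iu]` is ported as getD/set at iu.toNat, provably in range)
def pvAdjA (idx : PySem.Dict String Int) (edges : List (String × String))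
    (adj0 : List (List Int)) : List (List Int) :=
  edges.foldl (fun adj e =>
    match idx.get? e.1, idx.get? e.2 with
    | some iu, some iv =>
        if iu < iv then adj.set iu.toNat (adj.getD iu.toNat [] ++ [iv]) else adj
    | _, _ => adj) adj0

-- A's loop body at i: m = 0; for j in adj[i]: m |= (1 << j) | R[j];  R[i] = m
-- (1 << j is ported as (1 : Int) <<< j.toNat; j ≥ 0 always, so this is exact)
def pvStepA (adj : List (List Int)) (R : List Int) (i : Int) : List Int :=
  let m := (adj.getD i.toNat []).foldl
    (fun m j => PySem.Int.bor m (PySem.Int.bor ((1 : Int) <<< j.toNat) (R.getD j.toNat 0))) 0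
  R.set i.toNat m

def reachability_bitsets_py (items : List String) (edges : List (String × String)) :
    (List (String × Int)) × List Int :=
  let n := items.length
  let idx := pvIdx items
  let adj := pvAdjA idx edges (List.replicate n [])
  (idx.items,
    (PySem.List.pyRange ((n : Int) - 1) (-1) (-1)).foldl (pvStepA adj) (List.replicate n 0))

-- ===== PORT B =====
-- B's loop body: R[iu] |= (1 << iv) | R[iv]
-- (iu, iv ≥ 0 always, so indexing is ported via .toNat exactly)
def pvBStepI (R : List Int) (p : Int × Int) : List Int :=
  R.set p.1.toNat (PySem.Int.bor (R.getD p.1.toNat 0)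
    (PySem.Int.bor ((1 : Int) <<< p.2.toNat) (R.getD p.2.toNat 0)))

-- B's edge loop: pairs.append((iu, iv)) for the filtered edges — a flat pair list, no grouping
def pvPairsB (idx : PySem.Dict String Int) (edges : List (String × String)) : List (Int × Int) :=
  edges.foldl (fun pairs e =>
    match idx.get? e.1, idx.get? e.2 with
    | some iu, some iv => if iu < iv then pairs ++ [(iu, iv)] else pairs
    | _, _ => pairs) []

def reachability_bitsets_py_alt (items : List String) (edges : List (String × String)) :
    (List (String × Int)) × List Int :=
  let idx := pvIdx items
  -- pairs.sort(key=lambda p: -p[0])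
  let pairs := PySem.List.sorted (pvPairsB idx edges) (fun p => -p.1) false
  -- for iu, iv in pairs: R[iu] |= (1 << iv) | R[iv]
  (idx.items, pairs.foldl pvBStepI (List.replicate items.length 0))

-- ===== PRECONDITION & SPEC =====
def Spec_reachability_bitsets_py (items : List String) (edges : List (String × String)) (out : (List (String × Int)) × List Int) : Prop := out = reachability_bitsets_py_alt items edges
instance (items : List String) (edges : List (String × String)) (out : (List (String × Int)) × List Int) : Decidable (Spec_reachability_bitsets_py items edges out) := by unfold Spec_reachability_bitsets_py; infer_instance

-- ===== CLAIM (what is proved, stated in full; the proofs are below) =====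
def Claim_equal_reachability_bitsets_py : Prop := ∀ (items : List String) (edges : List (String × String)), Dom_reachability_bitsets_py items edges → Spec_reachability_bitsets_py items edges (reachability_bitsets_py items edges)

-- ===== LEMMAS AND PROOFS =====

-- the filtered edge stream both programs consume, as Nat index pairs
def pvStream (items : List String) (edges : List (String × String)) : List (Nat × Nat) :=
  edges.filterMap (fun e =>
    match (pvIdx items).get? e.1, (pvIdx items).get? e.2 with
    | some iu, some iv => if iu < iv then some (iu.toNat, iv.toNat) else none
    | _, _ => none)

def pvCast (p : Nat × Nat) : Int × Int := ((p.1 : Int), (p.2 : Int))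

def pvOrF (l : List Nat) : Nat := l.foldl (· ||| ·) 0

-- Nat-level model of A's loop body at k
def pvNStepA (S : List (Nat × Nat)) (R : List Nat) (k : Nat) : List Nat :=
  R.set k (pvOrF ((S.filter (fun p => p.1 == k)).map (fun p => (1 <<< p.2) ||| R.getD p.2 0)))

-- Nat-level model of B's flat fold step
def pvBStep (R : List Nat) (p : Nat × Nat) : List Nat :=
  R.set p.1 (R.getD p.1 0 ||| ((1 <<< p.2) ||| R.getD p.2 0))

-- state after processing indices n-1, …, k (downward recursion)
def pvTop (st : List Int → Int → List Int) (init : List Int) (n : Nat) (k : Nat) : List Int :=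
  if k < n then st (pvTop st init n (k + 1)) (k : Int) else init
termination_by n - k

def pvTopN (st : List Nat → Nat → List Nat) (init : List Nat) (n : Nat) (k : Nat) : List Nat :=
  if k < n then st (pvTopN st init n (k + 1)) k else init
termination_by n - k

-- processing counted from the top: pvProc st c R processes indices c-1, …, 0
def pvProc (st : List Int → Int → List Int) : Nat → List Int → List Int
  | 0, R => R
  | c + 1, R => pvProc st c (st R (c : Int))

lemma pv_pyRange_desc (n : Nat) :
    PySem.List.pyRange ((n : Int) - 1) (-1) (-1)
      = (List.range n).map (fun k : Nat => ((n : Int) - 1 - (k : Int))) := by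
  unfold PySem.List.pyRange
  cases n with
  | zero => simp
  | succ m =>
    have h1 : ((-1 : Int) < ((m+1 : Nat) : Int) - 1) := by omega
    simp only [if_neg (by norm_num : ¬ ((-1:Int) = 0)), if_neg (by norm_num : ¬ ((0:Int) < -1)), if_pos h1]
    have h2 : ((((m+1 : Nat) : Int) - 1 - (-1) + -(-1) - 1) / -(-1)).toNat = m + 1 := by
      push_cast; omega
    rw [h2]
    apply List.map_congr_left
    intro k _
    push_cast; ring

lemma pv_foldl_desc (st : List Int → Int → List Int) (n : Nat) (init : List Int) :
    ((List.range n).map (fun k : Nat => ((n : Int) - 1 - (k : Int)))).foldl st init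
      = pvProc st n init := by
  induction n generalizing init with
  | zero => simp [pvProc]
  | succ m ih =>
    rw [List.range_succ_eq_map]
    simp only [List.map_cons, List.foldl_cons, List.map_map]
    have he : ((m+1 : Nat) : Int) - 1 - ((0:Nat) : Int) = (m : Int) := by push_cast; ring
    rw [he]
    have hf : (fun k : Nat => ((m+1 : Nat) : Int) - 1 - (k : Int)) ∘ Nat.succ
        = (fun k : Nat => ((m : Nat) : Int) - 1 - (k : Int)) := by
      funext k; simp [Function.comp]; ring
    rw [hf, ih]
    rfl

lemma pv_proc_top (st : List Int → Int → List Int) (init : List Int) (n : Nat) :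
    ∀ j, j ≤ n → pvProc st j (pvTop st init n j) = pvTop st init n 0 := by
  intro j
  induction j with
  | zero => intro _; rfl
  | succ m ih =>
    intro h
    show pvProc st m (st (pvTop st init n (m+1)) (m : Int)) = _
    have hm : pvTop st init n m = st (pvTop st init n (m+1)) (m : Int) := by
      rw [pvTop]; simp [show m < n by omega]
    rw [← hm]
    exact ih (by omega)

lemma pv_port_fold (st : List Int → Int → List Int) (init : List Int) (n : Nat) :
    (PySem.List.pyRange ((n : Int) - 1) (-1) (-1)).foldl st init = pvTop st init n 0 := by
  rw [pv_pyRange_desc, pv_foldl_desc]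
  have hb : pvTop st init n n = init := by rw [pvTop]; simp
  conv_lhs => rw [← hb]
  exact pv_proc_top st init n n le_rfl

lemma pv_getD_map_cast (l : List Nat) (t : Nat) :
    (l.map (fun x : Nat => (x : Int))).getD t 0 = ((l.getD t 0 : Nat) : Int) := by
  rw [List.getD_eq_getElem?_getD, List.getD_eq_getElem?_getD, List.getElem?_map]
  cases l[t]? <;> simp

lemma pv_idx_bound (items : List String) :
    ∀ v i, (pvIdx items).get? v = some i → 0 ≤ i ∧ i < (items.length : Int) := by
  have aux : ∀ (l : List (Int × String)) (d : PySem.Dict String Int),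
      (∀ p ∈ l, 0 ≤ p.1 ∧ p.1 < (items.length : Int)) →
      (∀ v i, d.get? v = some i → 0 ≤ i ∧ i < (items.length : Int)) →
      ∀ v i, (l.foldl (fun d p => d.insert p.2 p.1) d).get? v = some i →
        0 ≤ i ∧ i < (items.length : Int) := by
    intro l
    induction l with
    | nil => intro d _ hd; exact hd
    | cons p rest ih =>
      intro d hl hd
      refine ih _ (fun q hq => hl q (by simp [hq])) ?_
      intro v i hvi
      rw [PySem.Dict.get?_insert] at hvi
      by_cases hv : v = p.2
      · rw [if_pos hv] at hvi
        exact Option.some_injective _ hvi ▸ hl p (by simp)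
      · exact hd v i (by rwa [if_neg hv] at hvi)
  intro v i h
  refine aux _ _ ?_ (by intro v i h; simp [PySem.Dict.get?_empty] at h) v i h
  intro p hp
  rw [PySem.List.mem_enumerate_iff] at hp
  obtain ⟨k, hk, rfl⟩ := hp
  simp; omega

lemma pv_stream_bound (items : List String) (edges : List (String × String)) :
    ∀ p ∈ pvStream items edges, p.1 < p.2 ∧ p.2 < items.length := by
  intro p hp
  unfold pvStream at hp
  rw [List.mem_filterMap] at hp
  obtain ⟨e, _, he⟩ := hp
  rcases hu : (pvIdx items).get? e.1 with _ | iu <;> rw [hu] at he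
  · simp at he
  rcases hv : (pvIdx items).get? e.2 with _ | iv <;> rw [hv] at he
  · simp at he
  simp only at he
  by_cases hlt : iu < iv
  · rw [if_pos hlt] at he
    obtain ⟨h1, h2⟩ := pv_idx_bound items e.1 iu hu
    obtain ⟨h3, h4⟩ := pv_idx_bound items e.2 iv hv
    cases he
    constructor <;> simp <;> omega
  · rw [if_neg hlt] at he; simp at he

lemma pv_build_getD (S : List (Nat × Nat)) (key : Nat × Nat → Nat) (val : Nat × Nat → Int) :
    ∀ (adj0 : List (List Int)), (∀ p ∈ S, key p < adj0.length) → ∀ t,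
    (S.foldl (fun adj p => adj.set (key p) (adj.getD (key p) [] ++ [val p])) adj0).getD t []
      = adj0.getD t [] ++ (S.filter (fun p => key p == t)).map val := by
  induction S with
  | nil => simp
  | cons p rest ih =>
    intro adj0 h t
    simp only [List.foldl_cons, List.filter_cons]
    have hlen : (adj0.set (key p) (adj0.getD (key p) [] ++ [val p])).length = adj0.length := by
      simp
    rw [ih _ (fun q hq => by rw [hlen]; exact h q (by simp [hq])) t]
    have hset : ∀ (x : List Int), (adj0.set (key p) x).getD t []
        = if t = key p then x else adj0.getD t [] := by
      intro x
      rw [List.getD_eq_getElem?_getD, List.getD_eq_getElem?_getD, List.getElem?_set]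
      by_cases ht : t = key p
      · subst ht; simp [h p (by simp)]
      · simp [Ne.symm ht]
        exact fun hk => absurd hk ht
    rw [hset]
    by_cases ht : key p = t
    · rw [if_pos ht.symm]
      have hb : (key p == t) = true := by simp [ht]
      rw [hb]
      simp [List.append_assoc, ht]
    · rw [if_neg (fun h' => ht h'.symm)]
      have hb : (key p == t) = false := by simp [ht]
      rw [hb]
      simp

lemma pv_adjA_getD (items : List String) (edges : List (String × String)) (t : Nat) :
    (pvAdjA (pvIdx items) edges (List.replicate items.length [])).getD t []
      = ((pvStream items edges).filter (fun p => p.1 == t)).map (fun p => ((p.2 : Nat) : Int)) := by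
  have hrw : pvAdjA (pvIdx items) edges (List.replicate items.length [])
      = (pvStream items edges).foldl
          (fun adj p => adj.set p.1 (adj.getD p.1 [] ++ [((p.2 : Nat) : Int)]))
          (List.replicate items.length []) := by
    unfold pvAdjA pvStream
    rw [List.foldl_filterMap]
    apply (PySem.List.foldl_congr_mem _ _ _ _ _).symm
    intro acc e _
    rcases hu : (pvIdx items).get? e.1 with _ | iu
    · rfl
    rcases hv : (pvIdx items).get? e.2 with _ | iv
    · rfl
    by_cases hlt : iu < iv
    · simp only [if_pos hlt]
      rw [Int.toNat_of_nonneg (pv_idx_bound items e.2 iv hv).1]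
    · simp only [if_neg hlt]
  rw [hrw, pv_build_getD (pvStream items edges) (fun p => p.1) (fun p => ((p.2 : Nat) : Int))
    (List.replicate items.length []) ?_ t]
  · simp [List.getD_eq_getElem?_getD, List.getElem?_replicate]
    split <;> rfl
  · intro p hp
    rw [List.length_replicate]
    have h2 := pv_stream_bound items edges p hp
    exact lt_trans h2.1 h2.2

lemma pv_shift_cast (t : Nat) : (1 : Int) <<< (t : Int) = ((1 <<< t : Nat) : Int) := by
  rw [Int.shiftLeft_natCast_right]; simp

lemma pv_shift_cast' (t : Nat) : (1 : Int) <<< t = ((1 <<< t : Nat) : Int) :=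
  Int.mem_toNat?.mp rfl

lemma pv_foldl_bor_cast (l : List (Nat × Nat)) (g : Nat × Nat → Nat) :
    ∀ a : Nat, l.foldl (fun m p => PySem.Int.bor m ((g p : Nat) : Int)) ((a : Nat) : Int)
      = ((l.foldl (fun m p => m ||| g p) a : Nat) : Int) := by
  induction l with
  | nil => intro a; rfl
  | cons p rest ih =>
    intro a
    simp only [List.foldl_cons, PySem.Int.bor_natCast]
    exact ih (a ||| g p)

lemma pv_stepA_cast (items : List String) (edges : List (String × String)) (NR : List Nat) (k : Nat) :
    pvStepA (pvAdjA (pvIdx items) edges (List.replicate items.length []))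
        (NR.map (fun x : Nat => (x : Int))) (k : Int)
      = (pvNStepA (pvStream items edges) NR k).map (fun x : Nat => (x : Int)) := by
  unfold pvStepA pvNStepA pvOrF
  rw [pv_adjA_getD, List.foldl_map, List.foldl_map]
  simp only [Int.toNat_natCast, pv_getD_map_cast, pv_shift_cast, PySem.Int.bor_natCast]
  conv_rhs => rw [List.map_set]
  have h := pv_foldl_bor_cast ((pvStream items edges).filter (fun p => p.1 == k))
    (fun p => 1 <<< p.2 ||| NR.getD p.2 0) 0
  rw [Nat.cast_zero] at h
  rw [h]

lemma pv_topA_cast (items : List String) (edges : List (String × String)) :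
    ∀ d k, items.length ≤ k + d →
    pvTop (pvStepA (pvAdjA (pvIdx items) edges (List.replicate items.length [])))
        (List.replicate items.length 0) items.length k
      = (pvTopN (pvNStepA (pvStream items edges)) (List.replicate items.length 0)
          items.length k).map (fun x : Nat => (x : Int)) := by
  intro d
  induction d with
  | zero =>
    intro k h
    rw [pvTop, pvTopN, if_neg (by omega), if_neg (by omega)]
    simp
  | succ m ih =>
    intro k h
    rw [pvTop, pvTopN]
    by_cases hk : k < items.length
    · rw [if_pos hk, if_pos hk, ih (k+1) (by omega), pv_stepA_cast]
    · rw [if_neg hk, if_neg hk]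
      simp

lemma pv_getD_set (R : List Nat) (k t m : Nat) (h : k < R.length) :
    (R.set k m).getD t 0 = if t = k then m else R.getD t 0 := by
  rw [List.getD_eq_getElem?_getD, List.getD_eq_getElem?_getD, List.getElem?_set]
  by_cases ht : t = k
  · subst ht; simp [h]
  · simp [Ne.symm ht]
    exact fun hk => absurd hk ht

lemma pv_orF_perm {l1 l2 : List Nat} (h : l1.Perm l2) : pvOrF l1 = pvOrF l2 :=
  h.foldl_eq 0

lemma pv_orF_shift (l : List Nat) : ∀ a : Nat, l.foldl (· ||| ·) a = a ||| pvOrF l := by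
  induction l with
  | nil => intro a; simp [pvOrF]
  | cons x xs ih =>
    intro a
    simp only [pvOrF, List.foldl_cons, Nat.zero_or]
    rw [ih (a ||| x), ih x, Nat.or_assoc]

lemma pv_orF_cons (x : Nat) (l : List Nat) : pvOrF (x :: l) = x ||| pvOrF l := by
  unfold pvOrF
  simp only [List.foldl_cons, Nat.zero_or]
  exact pv_orF_shift l x

lemma pv_nstepA_apply (S : List (Nat × Nat)) (R : List Nat) (k : Nat) :
    pvNStepA S R k
      = R.set k (pvOrF ((S.filter (fun p => p.1 == k)).map
          (fun p => (1 <<< p.2) ||| R.getD p.2 0))) := rfl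

-- length and below-k facts about A's Nat-level sweep
lemma pv_topN_length (S : List (Nat × Nat)) (n : Nat) :
    ∀ d k, k + d = n → (pvTopN (pvNStepA S) (List.replicate n 0) n k).length = n := by
  intro d
  induction d with
  | zero => intro k hk; rw [pvTopN, if_neg (by omega)]; simp
  | succ m ih =>
    intro k hk
    rw [pvTopN, if_pos (by omega)]
    unfold pvNStepA
    rw [List.length_set]
    exact ih (k+1) (by omega)

lemma pv_topN_zero (S : List (Nat × Nat)) (n : Nat) :
    ∀ d k, k + d = n → ∀ t, t < k →
      (pvTopN (pvNStepA S) (List.replicate n 0) n k).getD t 0 = 0 := by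
  intro d
  induction d with
  | zero =>
    intro k hk t ht
    rw [pvTopN, if_neg (by omega)]
    rw [List.getD_eq_getElem?_getD, List.getElem?_replicate]
    split <;> rfl
  | succ m ih =>
    intro k hk t ht
    rw [pvTopN, if_pos (by omega), pv_nstepA_apply,
      pv_getD_set _ _ _ _ (by rw [pv_topN_length S n m (k+1) (by omega)]; omega),
      if_neg (by omega)]
    exact ih (k+1) (by omega) t (by omega)

-- a source-wise non-increasing list with all sources ≥ k splits as (sources > k) ++ (sources = k)
lemma pv_split (k : Nat) : ∀ T : List (Nat × Nat),
    T.Pairwise (fun a b => b.1 ≤ a.1) → (∀ p ∈ T, k ≤ p.1) →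
    T = T.filter (fun p => decide (k + 1 ≤ p.1)) ++ T.filter (fun p => p.1 == k) := by
  intro T
  induction T with
  | nil => simp
  | cons x t ih =>
    intro hp hb
    rw [List.pairwise_cons] at hp
    rcases Nat.lt_or_ge k x.1 with hx | hx
    · have h1 : (decide (k + 1 ≤ x.1)) = true := by simp; omega
      have h2 : (x.1 == k) = false := by simp; omega
      simp only [List.filter_cons, h1, h2, if_true, Bool.false_eq_true, if_false,
        List.cons_append]
      rw [← ih hp.2 (fun p hpm => hb p (by simp [hpm]))]
    · have hxk : x.1 = k := by have := hb x (by simp); omega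
      have hall : ∀ p ∈ t, p.1 = k := by
        intro p hpm
        have := hp.1 p hpm
        have := hb p (by simp [hpm])
        omega
      have h1 : (decide (k + 1 ≤ x.1)) = false := by simp; omega
      have h2 : (x.1 == k) = true := by simp [hxk]
      have hf1 : t.filter (fun p => decide (k + 1 ≤ p.1)) = [] := by
        rw [List.filter_eq_nil_iff]
        intro p hpm
        simp [hall p hpm]
      have hf2 : t.filter (fun p => p.1 == k) = t := by
        rw [List.filter_eq_self]
        intro p hpm
        simp [hall p hpm]
      simp only [List.filter_cons, h1, h2, Bool.false_eq_true, if_false, if_true,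
        hf1, hf2, List.nil_append]

-- folding a group of edges all sourced at k ORs their masks into R[k] in one set
lemma pv_group_fold (k : Nat) : ∀ (l : List (Nat × Nat)) (R : List Nat), k < R.length →
    (∀ p ∈ l, p.1 = k ∧ p.2 ≠ k) →
    l.foldl pvBStep R
      = R.set k (R.getD k 0 ||| pvOrF (l.map (fun p => (1 <<< p.2) ||| R.getD p.2 0))) := by
  intro l
  induction l with
  | nil =>
    intro R hk _
    show R = _
    simp only [List.map_nil]
    have : pvOrF [] = 0 := rfl
    rw [this, Nat.or_zero, List.getD_eq_getElem?_getD, List.getElem?_eq_getElem hk]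
    simp
  | cons p t ih =>
    intro R hk hm
    obtain ⟨hp1, hp2⟩ := hm p (by simp)
    simp only [List.foldl_cons]
    have hstep : pvBStep R p = R.set k (R.getD k 0 ||| ((1 <<< p.2) ||| R.getD p.2 0)) := by
      unfold pvBStep; rw [hp1]
    rw [hstep]
    set x := (1 <<< p.2) ||| R.getD p.2 0 with hx
    set R' := R.set k (R.getD k 0 ||| x) with hR'
    have hk' : k < R'.length := by rw [hR', List.length_set]; exact hk
    rw [ih R' hk' (fun q hq => hm q (by simp [hq]))]
    have hgk : R'.getD k 0 = R.getD k 0 ||| x := by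
      rw [hR', pv_getD_set _ _ _ _ hk, if_pos rfl]
    have hmap : t.map (fun q => (1 <<< q.2) ||| R'.getD q.2 0)
        = t.map (fun q => (1 <<< q.2) ||| R.getD q.2 0) := by
      apply List.map_congr_left
      intro q hq
      rw [hR', pv_getD_set _ _ _ _ hk, if_neg (hm q (by simp [hq])).2]
    rw [hgk, hmap, hR', List.set_set, List.map_cons, pv_orF_cons, ← hx, Nat.or_assoc]

-- core: any source-wise non-increasing arrangement of the edges with source ≥ k,
-- flat-folded from zeros, yields A's sweep state after processing n-1, …, k
lemma pv_core (items : List String) (edges : List (String × String)) :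
    ∀ d k, k + d = items.length → ∀ T : List (Nat × Nat),
    T.Perm ((pvStream items edges).filter (fun p => decide (k ≤ p.1))) →
    T.Pairwise (fun a b => b.1 ≤ a.1) →
    T.foldl pvBStep (List.replicate items.length 0)
      = pvTopN (pvNStepA (pvStream items edges)) (List.replicate items.length 0)
          items.length k := by
  set S := pvStream items edges with hSdef
  set n := items.length
  intro d
  induction d with
  | zero =>
    intro k hk T hperm _
    have hf : S.filter (fun p => decide (k ≤ p.1)) = [] := by
      rw [List.filter_eq_nil_iff]
      intro p hpm
      have := pv_stream_bound items edges p hpm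
      simp; omega
    rw [hf] at hperm
    rw [List.perm_nil.mp hperm]
    rw [pvTopN, if_neg (by omega)]
    rfl
  | succ m ih =>
    intro k hk T hperm hpair
    have hkn : k < n := by omega
    have hbnd : ∀ p ∈ T, k ≤ p.1 := by
      intro p hpm
      have := hperm.mem_iff.mp hpm
      rw [List.mem_filter] at this
      simpa using this.2
    have hsplit := pv_split k T hpair hbnd
    set T1 := T.filter (fun p => decide (k + 1 ≤ p.1)) with hT1
    set T2 := T.filter (fun p => p.1 == k) with hT2
    have hperm1 : T1.Perm (S.filter (fun p => decide (k + 1 ≤ p.1))) := by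
      have h := hperm.filter (fun p => decide (k + 1 ≤ p.1))
      rw [List.filter_filter] at h
      refine h.trans (List.Perm.of_eq ?_)
      apply List.filter_congr
      intro p _
      rw [Bool.eq_iff_iff]; simp; omega
    have hpair1 : T1.Pairwise (fun a b => b.1 ≤ a.1) :=
      hpair.sublist List.filter_sublist
    have hperm2 : T2.Perm (S.filter (fun p => p.1 == k)) := by
      have h := hperm.filter (fun p => p.1 == k)
      rw [List.filter_filter] at h
      refine h.trans (List.Perm.of_eq ?_)
      apply List.filter_congr
      intro p _
      rw [Bool.eq_iff_iff]; simp; omega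
    have hstep1 := ih (k + 1) (by omega) T1 hperm1 hpair1
    conv_lhs => rw [hsplit]
    rw [List.foldl_append, hstep1]
    set F1 := pvTopN (pvNStepA S) (List.replicate n 0) n (k + 1) with hF1
    have hlen : F1.length = n := pv_topN_length S n m (k+1) (by omega)
    have hm2 : ∀ p ∈ T2, p.1 = k ∧ p.2 ≠ k := by
      intro p hpm
      have hmemS : p ∈ S := by
        have := hperm2.mem_iff.mp hpm
        rw [List.mem_filter] at this
        exact this.1
      have hb := pv_stream_bound items edges p hmemS
      have h1 : p.1 = k := by
        have := hperm2.mem_iff.mp hpm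
        rw [List.mem_filter] at this
        simpa using this.2
      exact ⟨h1, by omega⟩
    rw [pv_group_fold k T2 F1 (by omega) hm2]
    have hzero : F1.getD k 0 = 0 := pv_topN_zero S n m (k+1) (by omega) k (by omega)
    rw [hzero, Nat.zero_or]
    conv_rhs => rw [pvTopN, if_pos hkn, pv_nstepA_apply]
    rw [← hF1]
    congr 1
    exact pv_orF_perm (hperm2.map _)

-- B's pair list is the Int-cast of the stream
lemma pv_foldl_push (f : Nat × Nat → Int × Int) :
    ∀ (S : List (Nat × Nat)) (acc : List (Int × Int)),
      S.foldl (fun a p => a ++ [f p]) acc = acc ++ S.map f := by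
  intro S
  induction S with
  | nil => simp
  | cons p t ih => intro acc; rw [List.foldl_cons, ih, List.map_cons]; simp

lemma pv_pairsB_eq (items : List String) (edges : List (String × String)) :
    pvPairsB (pvIdx items) edges = (pvStream items edges).map pvCast := by
  have hrw : pvPairsB (pvIdx items) edges
      = (pvStream items edges).foldl (fun pairs p => pairs ++ [pvCast p]) [] := by
    unfold pvPairsB pvStream
    rw [List.foldl_filterMap]
    apply (PySem.List.foldl_congr_mem _ _ _ _ _).symm
    intro acc e _
    rcases hu : (pvIdx items).get? e.1 with _ | iu
    · rfl
    rcases hv : (pvIdx items).get? e.2 with _ | iv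
    · rfl
    by_cases hlt : iu < iv
    · simp only [if_pos hlt]
      unfold pvCast
      rw [Int.toNat_of_nonneg (pv_idx_bound items e.1 iu hu).1,
        Int.toNat_of_nonneg (pv_idx_bound items e.2 iv hv).1]
    · simp only [if_neg hlt]
  rw [hrw, pv_foldl_push]
  rfl

-- the Int-level flat fold over cast pairs is the cast of the Nat-level flat fold
lemma pv_foldB_cast : ∀ (T : List (Nat × Nat)) (NR : List Nat),
    (T.map pvCast).foldl pvBStepI (NR.map (fun x : Nat => (x : Int)))
      = (T.foldl pvBStep NR).map (fun x : Nat => (x : Int)) := by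
  intro T
  induction T with
  | nil => intro NR; rfl
  | cons p t ih =>
    intro NR
    rw [List.map_cons, List.foldl_cons, List.foldl_cons]
    have hstep : pvBStepI (NR.map (fun x : Nat => (x : Int))) (pvCast p)
        = (pvBStep NR p).map (fun x : Nat => (x : Int)) := by
      unfold pvBStepI pvCast pvBStep
      simp only [Int.toNat_natCast, pv_getD_map_cast, pv_shift_cast', PySem.Int.bor_natCast]
      rw [← List.map_set]
    rw [hstep, ih]

-- ===== VERDICT (by name: the statement is the Claim_ definition above) =====
theorem reachability_bitsets_py_spec : Claim_equal_reachability_bitsets_py := by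
  intro items edges _
  unfold Spec_reachability_bitsets_py reachability_bitsets_py reachability_bitsets_py_alt
  simp only
  rw [pv_port_fold, pv_topA_cast items edges items.length 0 (by omega)]
  rw [pv_pairsB_eq]
  set S := pvStream items edges with hSdef
  set Tint := PySem.List.sorted (S.map pvCast) (fun p => -p.1) false with hTint
  have hmemS : ∀ x ∈ Tint, x ∈ S.map pvCast := by
    intro x hx
    rwa [PySem.List.mem_sorted] at hx
  set T' := Tint.map (fun p : Int × Int => (p.1.toNat, p.2.toNat)) with hT'
  have hTeq : Tint = T'.map pvCast := by
    rw [hT', List.map_map]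
    conv_lhs => rw [← List.map_id Tint]
    apply List.map_congr_left
    intro x hx
    obtain ⟨y, _, hy⟩ := List.mem_map.mp (hmemS x hx)
    simp [Function.comp, pvCast, ← hy]
  have hpermT : T'.Perm S := by
    have h1 : Tint.Perm (S.map pvCast) := PySem.List.sorted_perm _ _ _
    have h2 := h1.map (fun p : Int × Int => (p.1.toNat, p.2.toNat))
    rw [← hT'] at h2
    refine h2.trans (List.Perm.of_eq ?_)
    rw [List.map_map]
    conv_rhs => rw [← List.map_id S]
    apply List.map_congr_left
    intro p _
    simp [Function.comp, pvCast]
  have hpairT : T'.Pairwise (fun a b : Nat × Nat => b.1 ≤ a.1) := by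
    have h1 := PySem.List.sorted_pairwise (S.map pvCast) (fun p : Int × Int => -p.1)
    rw [← hTint, hTeq, List.pairwise_map] at h1
    refine h1.imp ?_
    intro a b hab
    simp only [pvCast] at hab
    omega
  have hperm0 : T'.Perm (S.filter (fun p => decide (0 ≤ p.1))) := by
    refine hpermT.trans (List.Perm.of_eq ?_)
    rw [List.filter_eq_self.mpr]
    intro p _
    simp
  have hrepl : (List.replicate items.length (0 : Int))
      = (List.replicate items.length (0 : Nat)).map (fun x : Nat => (x : Int)) := by
    simp
  rw [hTeq, hrepl, pv_foldB_cast,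
    pv_core items edges items.length 0 (by omega) T' hperm0 hpairT]
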